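-- pv_equiv track=rewrite | github.com/sahilborhade77/traffic | scripts/demo_video_processor.py | generate_sample_signals
-- ===== SOURCE A (Python) =====
-- from typing import Tuple, Optional, List, Dict
--
-- def generate_sample_signals(frame_count: int) -> List[Dict[str, str]]:
--     """Generate sample signal state data."""
--     signals_list = []
--     cycle_length = 120  # 120 frames per cycle
--
--     for frame_idx in range(frame_count):
--         cycle_pos = frame_idx % cycle_length
--
--         # Simulate 4-way traffic signal
--         if cycle_pos < 40:
--             signals = {'North': 'green', 'South': 'red',
--                       'East': 'red', 'West': 'green'}
--         elif cycle_pos < 45: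
--             signals = {'North': 'yellow', 'South': 'red',
--                       'East': 'green', 'West': 'yellow'}
--         elif cycle_pos < 85:
--             signals = {'North': 'red', 'South': 'green',
--                       'East': 'green', 'West': 'red'}
--         else:
--             signals = {'North': 'red', 'South': 'yellow',
--                       'East': 'yellow', 'West': 'red'}
--
--         signals_list.append(signals)
--
--     return signals_list
-- ===== SOURCE B (Python) =====
-- from typing import List, Dict
--
-- def generate_sample_signals(frame_count: int) -> List[Dict[str, str]]:
--     """Generate sample signal state data by whole-cycle block repetition.
--
--     Builds one 120-frame cycle from a phase plan (duration, state) once, then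
--     assembles the answer as full copies of the cycle plus a sliced remainder:
--     no per-frame branching or modulo arithmetic at all.
--     """
--     phase_plan = [
--         (40, {'North': 'green', 'South': 'red', 'East': 'red', 'West': 'green'}),
--         (5,  {'North': 'yellow', 'South': 'red', 'East': 'green', 'West': 'yellow'}),
--         (40, {'North': 'red', 'South': 'green', 'East': 'green', 'West': 'red'}),
--         (35, {'North': 'red', 'South': 'yellow', 'East': 'yellow', 'West': 'red'}),
--     ]
--     cycle = [state for duration, state in phase_plan for _ in range(duration)]
--     full, rem = divmod(max(frame_count, 0), 120)
--     return [dict(state) for state in cycle * full + cycle[:rem]]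
-- ===== Notes on version B (the rewrite author's own statement) =====
-- stated objective: alternative
-- what changed: Replaces A's per-frame if-elif loop with block assembly: one full signal cycle is built once from a (duration, state) phase plan, and the result is whole-cycle list repetition plus a sliced remainder computed by divmod of the clamped frame count by the cycle length; there is no per-frame branch or modulo.
import Mathlib
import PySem

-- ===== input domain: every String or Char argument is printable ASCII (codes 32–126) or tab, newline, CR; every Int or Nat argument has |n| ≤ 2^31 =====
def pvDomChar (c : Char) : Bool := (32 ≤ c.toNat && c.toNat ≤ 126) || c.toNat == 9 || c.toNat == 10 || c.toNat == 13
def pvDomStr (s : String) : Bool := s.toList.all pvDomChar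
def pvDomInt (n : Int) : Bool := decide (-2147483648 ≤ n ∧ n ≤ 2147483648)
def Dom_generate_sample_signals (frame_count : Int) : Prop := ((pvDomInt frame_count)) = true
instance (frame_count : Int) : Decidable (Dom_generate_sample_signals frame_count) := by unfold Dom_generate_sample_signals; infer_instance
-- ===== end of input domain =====

-- B replaces A's per-frame if-elif loop by block assembly: one 120-frame cycle built from a phase plan,
-- then whole-cycle repetition plus a sliced remainder via divmod(max(frame_count,0), 120); same values.

-- ===== PORT A =====
-- A: loop over range(frame_count), pick the dict by the if-elif chain on frame_idx % 120, append.
def generate_sample_signals (frame_count : Int) : List (List (String × String)) :=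
  (PySem.List.pyRange 0 frame_count 1).foldl (fun signals_list frame_idx =>
    let cycle_pos := PySem.Int.mod frame_idx 120
    let signals :=
      if cycle_pos < 40 then
        [("North", "green"), ("South", "red"), ("East", "red"), ("West", "green")]
      else if cycle_pos < 45 then
        [("North", "yellow"), ("South", "red"), ("East", "green"), ("West", "yellow")]
      else if cycle_pos < 85 then
        [("North", "red"), ("South", "green"), ("East", "green"), ("West", "red")]
      else
        [("North", "red"), ("South", "yellow"), ("East", "yellow"), ("West", "red")]
    signals_list ++ [signals]) []

-- ===== PORT B =====
-- Source B's phase plan: (duration, signal state) per phase.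
def pvPhasePlan : List (Nat × List (String × String)) :=
  [ (40, [("North", "green"), ("South", "red"), ("East", "red"), ("West", "green")]),
    (5,  [("North", "yellow"), ("South", "red"), ("East", "green"), ("West", "yellow")]),
    (40, [("North", "red"), ("South", "green"), ("East", "green"), ("West", "red")]),
    (35, [("North", "red"), ("South", "yellow"), ("East", "yellow"), ("West", "red")]) ]

-- Source B's `cycle`: [state for duration, state in phase_plan for _ in range(duration)].
def pvCycle : List (List (String × String)) :=
  pvPhasePlan.flatMap (fun p => List.replicate p.1 p.2)

-- Source B: full, rem = divmod(max(frame_count, 0), 120); cycle * full + cycle[:rem], each dict copied.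
-- `cycle * full` (Python list repetition, full ≥ 0) is ported by hand as flatten of replicate — exact for
-- nonnegative counts; the per-element dict(state) copy is the identity on association lists.
def generate_sample_signals_alt (frame_count : Int) : List (List (String × String)) :=
  let m := max frame_count 0
  let full := PySem.Int.floordiv m 120
  let rem := PySem.Int.mod m 120
  (List.replicate full.toNat pvCycle).flatten ++ PySem.List.slice pvCycle none (some rem)

-- ===== PRECONDITION & SPEC =====
def Spec_generate_sample_signals (frame_count : Int) (out : List (List (String × String))) : Prop := out = generate_sample_signals_alt frame_count
instance (frame_count : Int) (out : List (List (String × String))) : Decidable (Spec_generate_sample_signals frame_count out) := by unfold Spec_generate_sample_signals; infer_instance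

-- ===== CLAIM =====
def Claim_equal_generate_sample_signals : Prop := ∀ (frame_count : Int), Dom_generate_sample_signals frame_count → Spec_generate_sample_signals frame_count (generate_sample_signals frame_count)

-- ===== LEMMAS AND PROOFS =====

-- A's if-elif chain as a function (proof-side helper naming the lambda inside A's loop body).
def pvChain (cycle_pos : Int) : List (String × String) :=
  if cycle_pos < 40 then
    [("North", "green"), ("South", "red"), ("East", "red"), ("West", "green")]
  else if cycle_pos < 45 then
    [("North", "yellow"), ("South", "red"), ("East", "green"), ("West", "yellow")]
  else if cycle_pos < 85 then
    [("North", "red"), ("South", "green"), ("East", "green"), ("West", "red")]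
  else
    [("North", "red"), ("South", "yellow"), ("East", "yellow"), ("West", "red")]

-- B's cycle is exactly A's chain evaluated over one period.
theorem pvCycle_eq_map_chain : pvCycle = (List.range 120).map (fun k : Nat => pvChain (k : Int)) := by
  decide

-- Generic block decomposition of a periodic map over an initial segment.
theorem pvMap_mod_range {α : Type} (f : Nat → α) (L : Nat) :
    ∀ (q r : Nat), r ≤ L →
      (List.range (q * L + r)).map (fun k => f (k % L)) =
        (List.replicate q ((List.range L).map f)).flatten ++ (List.range r).map f := by
  intro q
  induction q with
  | zero =>
    intro r hr
    simp only [Nat.zero_mul, Nat.zero_add, List.replicate_zero, List.flatten_nil, List.nil_append]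
    exact List.map_congr_left (fun k hk => by
      have : k < L := lt_of_lt_of_le (List.mem_range.mp hk) hr
      simp [Nat.mod_eq_of_lt this])
  | succ q ih =>
    intro r hr
    have hsplit : (q + 1) * L + r = L + (q * L + r) := by ring
    rw [hsplit, List.range_add, List.map_append, List.map_map]
    have hshift : (List.range (q * L + r)).map ((fun k => f (k % L)) ∘ (L + ·)) =
        (List.range (q * L + r)).map (fun k => f (k % L)) :=
      List.map_congr_left (fun k _ => by simp [Function.comp, Nat.add_mod_left])
    have hfst : (List.range L).map (fun k => f (k % L)) = (List.range L).map f :=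
      List.map_congr_left (fun k hk => by simp [Nat.mod_eq_of_lt (List.mem_range.mp hk)])
    rw [hshift, hfst, ih r hr, List.replicate_succ, List.flatten_cons, List.append_assoc]

-- ===== VERDICT =====
-- B's remainder slice is A's chain over the first r frames.
theorem pvTake_cycle (r : Nat) (hr : r ≤ 120) :
    pvCycle.take r = (List.range r).map (fun k : Nat => pvChain (k : Int)) := by
  rw [pvCycle_eq_map_chain, ← List.map_take, List.take_range, Nat.min_eq_left hr]

theorem pvA_eq_map (n : Int) :
    generate_sample_signals n =
      (List.range n.toNat).map (fun k => pvChain ((k % 120 : Nat) : Int)) := by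
  unfold generate_sample_signals
  rw [PySem.List.foldl_append_singleton_eq_map, PySem.List.pyRange_one, List.map_map]
  simp only [List.nil_append, Int.sub_zero]
  exact List.map_congr_left (fun k _ => by
    have hm : PySem.Int.mod ((0 : Int) + (k : Int)) 120 = ((k % 120 : Nat) : Int) := by
      rw [Int.zero_add]; exact_mod_cast PySem.Int.mod_natCast k 120
    simp only [Function.comp, hm]; rfl)

-- ===== VERDICT =====
theorem generate_sample_signals_spec : Claim_equal_generate_sample_signals := by
  intro n _
  unfold Spec_generate_sample_signals generate_sample_signals_alt
  show _ = (List.replicate (PySem.Int.floordiv (max n 0) 120).toNat pvCycle).flatten ++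
      PySem.List.slice pvCycle none (some (PySem.Int.mod (max n 0) 120))
  set N := n.toNat with hN
  have hm : max n 0 = (N : Int) := by omega
  have hfull : PySem.Int.floordiv ((N : Nat) : Int) 120 = ((N / 120 : Nat) : Int) := by
    exact_mod_cast PySem.Int.floordiv_natCast N 120
  have hrem : PySem.Int.mod ((N : Nat) : Int) 120 = ((N % 120 : Nat) : Int) := by
    exact_mod_cast PySem.Int.mod_natCast N 120
  rw [pvA_eq_map, ← hN, hm, hfull, hrem, PySem.List.slice_to_natCast, Int.toNat_natCast]
  have hrle : N % 120 ≤ 120 := le_of_lt (Nat.mod_lt _ (by omega))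
  have hsplit : N = N / 120 * 120 + N % 120 := by omega
  calc (List.range N).map (fun k => pvChain ((k % 120 : Nat) : Int))
      = (List.range (N / 120 * 120 + N % 120)).map
          (fun k => (fun j : Nat => pvChain (j : Int)) (k % 120)) := by rw [← hsplit]
    _ = (List.replicate (N / 120) ((List.range 120).map (fun j : Nat => pvChain (j : Int)))).flatten
          ++ (List.range (N % 120)).map (fun j : Nat => pvChain (j : Int)) :=
        pvMap_mod_range (fun j : Nat => pvChain (j : Int)) 120 (N / 120) (N % 120) hrle
    _ = (List.replicate (N / 120) pvCycle).flatten ++ pvCycle.take (N % 120) := by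
        rw [pvTake_cycle _ hrle, pvCycle_eq_map_chain]
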